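-- pv_equiv track=rewrite | github.com/vinaymaurya-UBI/label_alignment_hackathon | scripts/generate_from_websearch.py | extract_info_from_search
-- ===== SOURCE A (Python) =====
-- from typing import Dict, List, Optional
--
-- def extract_info_from_search(search_results: List[Dict]) -> Dict[str, str]:
--     """Extract relevant information from search results."""
--     info = {
--         "indications": "",
--         "dosage": "",
--         "side_effects": "",
--         "warnings": "",
--         "contraindications": "",
--         "mechanism": "",
--         "description": ""
--     }
--
--     # Combine snippets from search results
--     all_snippets = []
--     for result in search_results:
--         if "snippet" in result:
--             all_snippets.append(result["snippet"])
--         if "title" in result: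
--             all_snippets.append(result["title"])
--
--     combined_text = " ".join(all_snippets).lower()
--
--     # Try to extract information based on keywords
--     for snippet in all_snippets:
--         snippet_lower = snippet.lower()
--
--         # Look for indication keywords
--         if any(word in snippet_lower for word in ["indicated for", "used to treat", "treatment of"]):
--             if not info["indications"]:
--                 info["indications"] = snippet[:500]
--
--         # Look for dosage information
--         if any(word in snippet_lower for word in ["mg", "dose", "dosage", "tablet", "capsule", "once daily", "twice daily"]):
--             if not info["dosage"]:
--                 info["dosage"] = snippet[:300]
--
--         # Look for side effects
--         if any(word in snippet_lower for word in ["side effect", "adverse", "reaction", "nausea", "headache", "fatigue"]):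
--             if not info["side_effects"]:
--                 info["side_effects"] = snippet[:400]
--
--         # Look for warnings
--         if any(word in snippet_lower for word in ["warning", "caution", "risk", "serious", "severe"]):
--             if not info["warnings"]:
--                 info["warnings"] = snippet[:300]
--
--         # Look for contraindications
--         if any(word in snippet_lower for word in ["contraindicated", "not use", "should not", "hypersensitivity"]):
--             if not info["contraindications"]:
--                 info["contraindications"] = snippet[:300]
--
--     # Generate generic info if specific info not found
--     if not info["description"]:
--         info["description"] = f"Pharmaceutical product for the treatment of specified conditions."
--
--     return info
-- ===== SOURCE B (Python) =====
-- from typing import Dict, List, Optional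
--
-- _FIELDS = [
--     ("indications", ["indicated for", "used to treat", "treatment of"], 500),
--     ("dosage", ["mg", "dose", "dosage", "tablet", "capsule", "once daily", "twice daily"], 300),
--     ("side_effects", ["side effect", "adverse", "reaction", "nausea", "headache", "fatigue"], 400),
--     ("warnings", ["warning", "caution", "risk", "serious", "severe"], 300),
--     ("contraindications", ["contraindicated", "not use", "should not", "hypersensitivity"], 300),
-- ]
--
-- def extract_info_from_search(search_results: List[Dict]) -> Dict[str, str]:
--     """Extract relevant information from search results (field-outer first-match search)."""
--     all_snippets = []
--     for result in search_results:
--         if "snippet" in result: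
--             all_snippets.append(result["snippet"])
--         if "title" in result:
--             all_snippets.append(result["title"])
--
--     info = {
--         name: next((s[:n] for s in all_snippets
--                     if any(w in s.lower() for w in kws)), "")
--         for name, kws, n in _FIELDS
--     }
--     info["mechanism"] = ""
--     info["description"] = "Pharmaceutical product for the treatment of specified conditions."
--     return info
-- ===== Notes on version B (the rewrite author's own statement) =====
-- stated objective: simpler
-- what changed: Replaces A's snippet-outer pass that conditionally fills five dict fields in turn with a table-driven field-outer search: each field's value is the truncated first snippet matching its keyword list (next(...) with early stop), then the fixed fields are set.
import Mathlib
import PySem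

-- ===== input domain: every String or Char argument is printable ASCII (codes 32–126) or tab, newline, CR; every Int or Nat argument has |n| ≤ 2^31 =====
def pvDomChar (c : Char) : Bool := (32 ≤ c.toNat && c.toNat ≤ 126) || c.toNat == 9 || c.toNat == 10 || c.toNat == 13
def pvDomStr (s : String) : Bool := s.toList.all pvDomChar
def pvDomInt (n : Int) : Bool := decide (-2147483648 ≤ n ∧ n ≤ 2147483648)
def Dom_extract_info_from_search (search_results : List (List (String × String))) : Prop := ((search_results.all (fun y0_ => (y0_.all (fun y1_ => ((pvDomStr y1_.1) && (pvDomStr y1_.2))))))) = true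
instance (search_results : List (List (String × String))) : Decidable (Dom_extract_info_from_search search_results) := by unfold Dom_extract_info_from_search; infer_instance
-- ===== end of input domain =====

-- B replaces A's snippet-outer pass that fills five dict fields with a field-outer
-- table-driven first-match search (objective: simpler/alternative decomposition).

-- ===== PORT A =====
-- shared keyword lists (the same literals both Pythons test with `w in snippet.lower()`)
def pvKwInd : List String := ["indicated for", "used to treat", "treatment of"]
def pvKwDos : List String := ["mg", "dose", "dosage", "tablet", "capsule", "once daily", "twice daily"]
def pvKwSide : List String := ["side effect", "adverse", "reaction", "nausea", "headache", "fatigue"]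
def pvKwWarn : List String := ["warning", "caution", "risk", "serious", "severe"]
def pvKwContra : List String := ["contraindicated", "not use", "should not", "hypersensitivity"]

def pvMatch (kws : List String) (sl : String) : Bool := kws.any (fun w => PySem.Str.isIn w sl)

-- snippet[:n]
def pvTrunc (n : Nat) (s : String) : String := PySem.Str.slice s none (some (n : Int))

def pvDesc : String := "Pharmaceutical product for the treatment of specified conditions."

-- the loop that builds all_snippets (A's loop; Source B contains the identical loop)
def pvAllSnippetsA (search_results : List (List (String × String))) : List String :=
  search_results.foldl (fun acc result =>
    let d : PySem.Dict String String := PySem.Dict.mk result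
    let acc := if d.contains "snippet" then acc ++ [(d.get? "snippet").getD ""] else acc
    if d.contains "title" then acc ++ [(d.get? "title").getD ""] else acc) []

-- the body of A's `for snippet in all_snippets:` loop
def pvStepA (info : PySem.Dict String String) (snippet : String) : PySem.Dict String String :=
  let sl := PySem.Str.lower snippet
  let info := if pvMatch pvKwInd sl then
      (if (info.getD "indications" "") = "" then info.insert "indications" (pvTrunc 500 snippet) else info)
    else info
  let info := if pvMatch pvKwDos sl then
      (if (info.getD "dosage" "") = "" then info.insert "dosage" (pvTrunc 300 snippet) else info)
    else info
  let info := if pvMatch pvKwSide sl then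
      (if (info.getD "side_effects" "") = "" then info.insert "side_effects" (pvTrunc 400 snippet) else info)
    else info
  let info := if pvMatch pvKwWarn sl then
      (if (info.getD "warnings" "") = "" then info.insert "warnings" (pvTrunc 300 snippet) else info)
    else info
  let info := if pvMatch pvKwContra sl then
      (if (info.getD "contraindications" "") = "" then info.insert "contraindications" (pvTrunc 300 snippet) else info)
    else info
  info

def extract_info_from_search (search_results : List (List (String × String))) : List (String × String) :=
  let info : PySem.Dict String String := PySem.Dict.ofList
    [("indications", ""), ("dosage", ""), ("side_effects", ""), ("warnings", ""),
     ("contraindications", ""), ("mechanism", ""), ("description", "")]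
  let all_snippets := pvAllSnippetsA search_results
  let _combined_text := PySem.Str.lower (PySem.Str.join " " all_snippets)  -- computed, never used (as in A)
  let info := all_snippets.foldl pvStepA info
  let info := if (info.getD "description" "") = "" then info.insert "description" pvDesc else info
  info.items

-- ===== PORT B =====
def pvFields : List (String × List String × Nat) :=
  [("indications", pvKwInd, 500), ("dosage", pvKwDos, 300), ("side_effects", pvKwSide, 400),
   ("warnings", pvKwWarn, 300), ("contraindications", pvKwContra, 300)]

-- next((s[:n] for s in snips if any(w in s.lower() for w in kws)), "")
def pvFirst (kws : List String) (n : Nat) (snips : List String) : String :=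
  ((snips.find? (fun s => pvMatch kws (PySem.Str.lower s))).map (pvTrunc n)).getD ""

def pvAllSnippetsB (search_results : List (List (String × String))) : List String :=
  search_results.foldl (fun acc result =>
    let d : PySem.Dict String String := PySem.Dict.mk result
    let acc := if d.contains "snippet" then acc ++ [(d.get? "snippet").getD ""] else acc
    if d.contains "title" then acc ++ [(d.get? "title").getD ""] else acc) []

def extract_info_from_search_alt (search_results : List (List (String × String))) : List (String × String) :=
  let snips := pvAllSnippetsB search_results
  (pvFields.map (fun f => (f.1, pvFirst f.2.1 f.2.2 snips))) ++ [("mechanism", ""), ("description", pvDesc)]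

-- ===== PRECONDITION & SPEC =====
def Spec_extract_info_from_search (search_results : List (List (String × String))) (out : List (String × String)) : Prop := out = extract_info_from_search_alt search_results
instance (search_results : List (List (String × String))) (out : List (String × String)) : Decidable (Spec_extract_info_from_search search_results out) := by unfold Spec_extract_info_from_search; infer_instance

-- ===== CLAIM (what is proved, stated in full; the proofs are below) =====
def Claim_equal_extract_info_from_search : Prop := ∀ (search_results : List (List (String × String))), Dom_extract_info_from_search search_results → Spec_extract_info_from_search search_results (extract_info_from_search search_results)

-- ===== LEMMAS AND PROOFS =====

-- the info dict with the five extracted fields as parameters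
def pvMk (i d s w c : String) : PySem.Dict String String :=
  PySem.Dict.mk [("indications", i), ("dosage", d), ("side_effects", s), ("warnings", w),
                 ("contraindications", c), ("mechanism", ""), ("description", "")]

-- one field of A's loop, as a fold over the snippets
def pvG (kws : List String) (n : Nat) (v : String) (xs : List String) : String :=
  xs.foldl (fun f t => if pvMatch kws (PySem.Str.lower t) = true ∧ f = "" then pvTrunc n t else f) v

theorem pvGetD_ind (i d s w c : String) : (pvMk i d s w c).getD "indications" "" = i := by
  simp [pvMk, PySem.Dict.getD, PySem.Dict.get?]
theorem pvGetD_dos (i d s w c : String) : (pvMk i d s w c).getD "dosage" "" = d := by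
  simp [pvMk, PySem.Dict.getD, PySem.Dict.get?, List.find?]
theorem pvGetD_side (i d s w c : String) : (pvMk i d s w c).getD "side_effects" "" = s := by
  simp [pvMk, PySem.Dict.getD, PySem.Dict.get?, List.find?]
theorem pvGetD_warn (i d s w c : String) : (pvMk i d s w c).getD "warnings" "" = w := by
  simp [pvMk, PySem.Dict.getD, PySem.Dict.get?, List.find?]
theorem pvGetD_contra (i d s w c : String) : (pvMk i d s w c).getD "contraindications" "" = c := by
  simp [pvMk, PySem.Dict.getD, PySem.Dict.get?, List.find?]
theorem pvGetD_desc (i d s w c : String) : (pvMk i d s w c).getD "description" "" = "" := by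
  simp [pvMk, PySem.Dict.getD, PySem.Dict.get?, List.find?]

theorem pvIns_ind (i d s w c v : String) : (pvMk i d s w c).insert "indications" v = pvMk v d s w c := by
  simp [pvMk, PySem.Dict.insert, PySem.Dict.contains, List.any]
theorem pvIns_dos (i d s w c v : String) : (pvMk i d s w c).insert "dosage" v = pvMk i v s w c := by
  simp [pvMk, PySem.Dict.insert, PySem.Dict.contains, List.any]
theorem pvIns_side (i d s w c v : String) : (pvMk i d s w c).insert "side_effects" v = pvMk i d v w c := by
  simp [pvMk, PySem.Dict.insert, PySem.Dict.contains, List.any]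
theorem pvIns_warn (i d s w c v : String) : (pvMk i d s w c).insert "warnings" v = pvMk i d s v c := by
  simp [pvMk, PySem.Dict.insert, PySem.Dict.contains, List.any]
theorem pvIns_contra (i d s w c v : String) : (pvMk i d s w c).insert "contraindications" v = pvMk i d s w v := by
  simp [pvMk, PySem.Dict.insert, PySem.Dict.contains, List.any]
theorem pvIns_desc (i d s w c : String) :
    (pvMk i d s w c).insert "description" pvDesc =
      PySem.Dict.mk [("indications", i), ("dosage", d), ("side_effects", s), ("warnings", w),
                     ("contraindications", c), ("mechanism", ""), ("description", pvDesc)] := by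
  simp [pvMk, PySem.Dict.insert, PySem.Dict.contains, List.any]

theorem pvUpd_ind (m : Bool) (i d s w c v : String) :
    (if m = true then (if (pvMk i d s w c).getD "indications" "" = "" then (pvMk i d s w c).insert "indications" v else pvMk i d s w c) else pvMk i d s w c)
      = pvMk (if m = true ∧ i = "" then v else i) d s w c := by
  cases m
  · simp
  · by_cases hi : i = "" <;> simp [pvGetD_ind, pvIns_ind, hi]
theorem pvUpd_dos (m : Bool) (i d s w c v : String) :
    (if m = true then (if (pvMk i d s w c).getD "dosage" "" = "" then (pvMk i d s w c).insert "dosage" v else pvMk i d s w c) else pvMk i d s w c)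
      = pvMk i (if m = true ∧ d = "" then v else d) s w c := by
  cases m
  · simp
  · by_cases hd : d = "" <;> simp [pvGetD_dos, pvIns_dos, hd]
theorem pvUpd_side (m : Bool) (i d s w c v : String) :
    (if m = true then (if (pvMk i d s w c).getD "side_effects" "" = "" then (pvMk i d s w c).insert "side_effects" v else pvMk i d s w c) else pvMk i d s w c)
      = pvMk i d (if m = true ∧ s = "" then v else s) w c := by
  cases m
  · simp
  · by_cases hs : s = "" <;> simp [pvGetD_side, pvIns_side, hs]
theorem pvUpd_warn (m : Bool) (i d s w c v : String) :
    (if m = true then (if (pvMk i d s w c).getD "warnings" "" = "" then (pvMk i d s w c).insert "warnings" v else pvMk i d s w c) else pvMk i d s w c)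
      = pvMk i d s (if m = true ∧ w = "" then v else w) c := by
  cases m
  · simp
  · by_cases hw : w = "" <;> simp [pvGetD_warn, pvIns_warn, hw]
theorem pvUpd_contra (m : Bool) (i d s w c v : String) :
    (if m = true then (if (pvMk i d s w c).getD "contraindications" "" = "" then (pvMk i d s w c).insert "contraindications" v else pvMk i d s w c) else pvMk i d s w c)
      = pvMk i d s w (if m = true ∧ c = "" then v else c) := by
  cases m
  · simp
  · by_cases hc : c = "" <;> simp [pvGetD_contra, pvIns_contra, hc]

theorem pvStepA_mk (i d s w c t : String) :
    pvStepA (pvMk i d s w c) t =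
      pvMk (if pvMatch pvKwInd (PySem.Str.lower t) = true ∧ i = "" then pvTrunc 500 t else i)
           (if pvMatch pvKwDos (PySem.Str.lower t) = true ∧ d = "" then pvTrunc 300 t else d)
           (if pvMatch pvKwSide (PySem.Str.lower t) = true ∧ s = "" then pvTrunc 400 t else s)
           (if pvMatch pvKwWarn (PySem.Str.lower t) = true ∧ w = "" then pvTrunc 300 t else w)
           (if pvMatch pvKwContra (PySem.Str.lower t) = true ∧ c = "" then pvTrunc 300 t else c) := by
  simp only [pvStepA]
  rw [pvUpd_ind, pvUpd_dos, pvUpd_side, pvUpd_warn, pvUpd_contra]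

theorem pvFoldA (xs : List String) (i d s w c : String) :
    xs.foldl pvStepA (pvMk i d s w c) =
      pvMk (pvG pvKwInd 500 i xs) (pvG pvKwDos 300 d xs) (pvG pvKwSide 400 s xs)
           (pvG pvKwWarn 300 w xs) (pvG pvKwContra 300 c xs) := by
  induction xs generalizing i d s w c with
  | nil => rfl
  | cons t xs ih => simp only [List.foldl_cons, pvStepA_mk, ih, pvG]

theorem pvTrunc_ne_empty (n : Nat) (hn : 0 < n) (s : String) (hs : s ≠ "") : pvTrunc n s ≠ "" := by
  intro h
  apply hs
  have h' : (pvTrunc n s).toList = ([] : List Char) := by rw [h]; rfl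
  rw [pvTrunc, PySem.Str.toList_slice] at h'
  have h2 : s.toList.take n = [] := by
    simpa [PySem.Chars.slice_eq_listSlice, PySem.List.slice_to_natCast] using h'
  rw [List.take_eq_nil_iff] at h2
  rcases h2 with h2 | h2
  · omega
  · exact String.toList_inj.mp (by simp [h2])

theorem pvG_eq_pvFirst (kws : List String) (n : Nat) (hn : 0 < n)
    (h0 : pvMatch kws (PySem.Str.lower "") = false) :
    ∀ (xs : List String) (v : String), pvG kws n v xs = if v = "" then pvFirst kws n xs else v := by
  intro xs
  induction xs with
  | nil => intro v; simp [pvG, pvFirst]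
  | cons t xs ih =>
    intro v
    simp only [pvG, List.foldl_cons]
    by_cases hm : pvMatch kws (PySem.Str.lower t) = true
    · by_cases hv : v = ""
      · subst hv
        rw [if_pos ⟨hm, rfl⟩]
        have ht : t ≠ "" := by
          intro ht; rw [ht, h0] at hm; exact Bool.false_ne_true hm
        have h1 := ih (pvTrunc n t)
        simp only [pvG] at h1
        rw [h1, if_neg (pvTrunc_ne_empty n hn t ht), if_pos rfl]
        simp [pvFirst, List.find?_cons_of_pos, hm]
      · rw [if_neg (fun hc => hv hc.2)]
        have h1 := ih v
        simp only [pvG] at h1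
        rw [h1, if_neg hv, if_neg hv]
    · rw [if_neg (fun hc => hm hc.1)]
      have h1 := ih v
      simp only [pvG] at h1
      rw [h1]
      by_cases hv : v = ""
      · rw [if_pos hv, if_pos hv]
        have : List.find? (fun s => pvMatch kws (PySem.Str.lower s)) (t :: xs)
            = List.find? (fun s => pvMatch kws (PySem.Str.lower s)) xs := by
          rw [List.find?_cons_of_neg]
          simpa using hm
        simp [pvFirst, this]
      · rw [if_neg hv, if_neg hv]

theorem pvG_empty (kws : List String) (n : Nat) (hn : 0 < n)
    (h0 : pvMatch kws (PySem.Str.lower "") = false) (xs : List String) :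
    pvG kws n "" xs = pvFirst kws n xs := by
  rw [pvG_eq_pvFirst kws n hn h0 xs "", if_pos rfl]

-- the five emptiness facts: no keyword occurs in the empty string
theorem pv_h0_ind : pvMatch pvKwInd (PySem.Str.lower "") = false := by decide
theorem pv_h0_dos : pvMatch pvKwDos (PySem.Str.lower "") = false := by decide
theorem pv_h0_side : pvMatch pvKwSide (PySem.Str.lower "") = false := by decide
theorem pv_h0_warn : pvMatch pvKwWarn (PySem.Str.lower "") = false := by decide
theorem pv_h0_contra : pvMatch pvKwContra (PySem.Str.lower "") = false := by decide

-- ===== VERDICT (by name: the statement is the Claim_ definition above) =====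
theorem extract_info_from_search_spec : Claim_equal_extract_info_from_search := by
  intro rs _
  unfold Spec_extract_info_from_search
  have hsn : pvAllSnippetsB rs = pvAllSnippetsA rs := rfl
  have h0 : (PySem.Dict.ofList
      [("indications", ""), ("dosage", ""), ("side_effects", ""), ("warnings", ""),
       ("contraindications", ""), ("mechanism", ""), ("description", "")] : PySem.Dict String String)
      = pvMk "" "" "" "" "" := rfl
  simp only [extract_info_from_search, extract_info_from_search_alt, hsn, h0, pvFoldA]
  rw [pvG_empty pvKwInd 500 (by omega) pv_h0_ind,
      pvG_empty pvKwDos 300 (by omega) pv_h0_dos,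
      pvG_empty pvKwSide 400 (by omega) pv_h0_side,
      pvG_empty pvKwWarn 300 (by omega) pv_h0_warn,
      pvG_empty pvKwContra 300 (by omega) pv_h0_contra,
      pvGetD_desc, if_pos rfl, pvIns_desc]
  rfl
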